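-- pv_equiv track=rewrite | github.com/KargKarg/In_silico | ADN/correction_reads.py | distance_hamming
-- ===== SOURCE A (Python) =====
-- def distance_hamming(sequence1: str, sequence2: str) -> tuple:
--     """
--                 Renvoie la distance Hamming des deux séquences, la distance est incrémentée lorsque
--                 sequence1[i] != sequence2[i].
--
--                 Args:
--                     - sequence1 (str): La chaîne de caractères de la première séquence.
--                     - sequence2 (str): La chaîne de caractères de la deuxième séquence.
--
--                 Returns:
--                     - La distance Hamming et l'indice de la dernière mutation observée.
--
--                 Print:
--                     - Aucun.
--
--     """
--     distance = 0
--     indice = 0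
--     for i in range(min(len(sequence1), len(sequence2))):
--         if sequence1[i] != sequence2[i]:
--             distance += 1
--             indice = i
--     return distance, indice
-- ===== SOURCE B (Python) =====
-- def distance_hamming(sequence1: str, sequence2: str) -> tuple:
--     distance = sum(a != b for a, b in zip(sequence1, sequence2))
--     indice = 0
--     for i in range(min(len(sequence1), len(sequence2)) - 1, -1, -1):
--         if sequence1[i] != sequence2[i]:
--             indice = i
--             break
--     return distance, indice
-- ===== Notes on version B (the rewrite author's own statement) =====
-- stated objective: alternative
-- what changed: Replaces the single combined loop by two differently-shaped passes: a forward zip-based count of mismatches and a reverse early-exit scan for the last mutation index (default 0).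
import Mathlib
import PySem

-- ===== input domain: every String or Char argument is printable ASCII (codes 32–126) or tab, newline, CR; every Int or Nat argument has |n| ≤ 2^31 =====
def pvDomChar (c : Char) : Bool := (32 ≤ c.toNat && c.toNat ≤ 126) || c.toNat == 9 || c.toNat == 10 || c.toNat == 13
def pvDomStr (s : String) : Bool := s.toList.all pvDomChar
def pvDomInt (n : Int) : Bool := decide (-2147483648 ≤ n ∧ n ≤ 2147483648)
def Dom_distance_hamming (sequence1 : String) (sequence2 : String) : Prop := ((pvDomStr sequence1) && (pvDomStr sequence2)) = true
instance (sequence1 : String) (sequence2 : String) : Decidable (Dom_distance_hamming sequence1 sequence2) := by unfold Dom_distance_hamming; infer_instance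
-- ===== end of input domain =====

-- B replaces A's single combined loop by two passes: a forward zip-based mismatch count
-- and a reverse early-exit scan for the last mutation index (objective: alternative).

-- ===== PORT A =====
-- single loop over range(min(len,len)); indices are always in range, so s[i] is pyGetD
def distance_hamming (sequence1 : String) (sequence2 : String) : Int × Int :=
  let l1 := sequence1.toList
  let l2 := sequence2.toList
  (PySem.List.pyRange 0 (min (l1.length : Int) (l2.length : Int)) 1).foldl
    (fun st i =>
      if PySem.List.pyGetD l1 i ' ' ≠ PySem.List.pyGetD l2 i ' ' then (st.1 + 1, i) else st)
    (0, 0)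

-- ===== PORT B =====
-- reverse scan: for i in range(n-1, -1, -1): if mismatch: return i  (else 0)
def pvAltLast (l1 l2 : List Char) : Nat → Int
  | 0 => 0
  | i + 1 => if l1.getD i ' ' ≠ l2.getD i ' ' then (i : Int) else pvAltLast l1 l2 i

def distance_hamming_alt (sequence1 : String) (sequence2 : String) : Int × Int :=
  let l1 := sequence1.toList
  let l2 := sequence2.toList
  (((l1.zip l2).countP (fun p => p.1 != p.2) : Int), pvAltLast l1 l2 (min l1.length l2.length))

-- ===== PRECONDITION & SPEC =====
def Spec_distance_hamming (sequence1 : String) (sequence2 : String) (out : Int × Int) : Prop := out = distance_hamming_alt sequence1 sequence2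
instance (sequence1 : String) (sequence2 : String) (out : Int × Int) : Decidable (Spec_distance_hamming sequence1 sequence2 out) := by unfold Spec_distance_hamming; infer_instance

-- ===== CLAIM (what is proved, stated in full; the proofs are below) =====
def Claim_equal_distance_hamming : Prop := ∀ (sequence1 : String) (sequence2 : String), Dom_distance_hamming sequence1 sequence2 → Spec_distance_hamming sequence1 sequence2 (distance_hamming sequence1 sequence2)

-- ===== LEMMAS AND PROOFS =====

lemma pvFold_eq (l1 l2 : List Char) (n : Nat) (hn : n ≤ min l1.length l2.length) :
    (PySem.List.pyRange 0 (n : Int) 1).foldl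
      (fun (st : Int × Int) i =>
        if PySem.List.pyGetD l1 i ' ' ≠ PySem.List.pyGetD l2 i ' ' then (st.1 + 1, i) else st)
      (0, 0)
    = ((((l1.zip l2).take n).countP (fun p => p.1 != p.2) : Int), pvAltLast l1 l2 n) := by
  induction n with
  | zero => simp [PySem.List.pyRange_one_eq_nil, pvAltLast]
  | succ k ih =>
    have hk1 : k < l1.length := by omega
    have hk2 : k < l2.length := by omega
    have hkz : k < (l1.zip l2).length := by simp [List.length_zip]; omega
    have hcast : ((k + 1 : Nat) : Int) = (k : Int) + 1 := by push_cast; ring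
    rw [hcast, PySem.List.pyRange_one_succ_right (by positivity), List.foldl_append,
        ih (by omega)]
    have htake : (l1.zip l2).take (k + 1) = (l1.zip l2).take k ++ [(l1[k], l2[k])] := by
      rw [List.take_add_one, List.getElem?_eq_getElem hkz]
      simp [List.getElem_zip]
    simp only [List.foldl_cons, List.foldl_nil, htake, List.countP_append,
      List.countP_singleton, pvAltLast, PySem.List.pyGetD_natCast,
      List.getD_eq_getElem l1 ' ' hk1, List.getD_eq_getElem l2 ' ' hk2]
    by_cases h : l1[k] = l2[k] <;> simp [h]

-- ===== VERDICT (by name: the statement is the Claim_ definition above) =====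
theorem distance_hamming_spec : Claim_equal_distance_hamming := by
  intro s1 s2 _
  unfold Spec_distance_hamming distance_hamming distance_hamming_alt
  dsimp only
  have hmin : (min (s1.toList.length : Int) (s2.toList.length : Int))
      = ((min s1.toList.length s2.toList.length : Nat) : Int) := by
    simp [Nat.cast_min]
  rw [hmin, pvFold_eq _ _ _ (le_refl _)]
  have : (s1.toList.zip s2.toList).take (min s1.toList.length s2.toList.length)
      = s1.toList.zip s2.toList := by
    rw [List.take_of_length_le]; simp [List.length_zip]
  rw [this]
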